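-- pv_equiv track=rewrite | github.com/asnower/DialFill-v2 | utils/decode.py | calc_banned_bad_words_ids
-- ===== SOURCE A (Python) =====
-- from typing import Iterable, List
--
-- def calc_banned_bad_words_ids(prev_input_ids: Iterable[int], bad_words_ids: Iterable[int]) -> Iterable[int]:
--     banned_tokens = []
--
--     def _tokens_match(prev_tokens, tokens):
--         if len(tokens) == 0:
--             # if bad word tokens is just one token always ban it
--             return True
--         if len(tokens) > len(prev_tokens):
--             # if bad word tokens are longer than prev tokens they can't be equal
--             return False
--
--         if prev_tokens[-len(tokens) :] == tokens:
--             # if tokens match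
--             return True
--         else:
--             return False
--
--     for prev_input_ids_slice in prev_input_ids:
--         banned_tokens_slice = []
--
--         for banned_token_seq in bad_words_ids:
--             assert len(banned_token_seq) > 0, "Banned words token sequences {} cannot have an empty list".format(
--                 bad_words_ids
--             )
--
--             if _tokens_match(prev_input_ids_slice, banned_token_seq[:-1]) is False:
--                 # if tokens do not match continue
--                 continue
--
--             banned_tokens_slice.append(banned_token_seq[-1])
--
--         banned_tokens.append(banned_tokens_slice)
--
--     return banned_tokens
-- ===== SOURCE B (Python) =====
-- def calc_banned_bad_words_ids(prev_input_ids, bad_words_ids):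
--     # Group the bad words by their prefix once; per context slice, iterate over the
--     # slice's suffix LENGTHS (not over the words) and look each suffix up in the
--     # index; the original word order is restored via the stored indices.
--     entries = [(tuple(seq[:-1]), (idx, seq[-1])) for idx, seq in enumerate(bad_words_ids)]
--     by_prefix = {}
--     for p, il in entries:
--         by_prefix.setdefault(p, []).append(il)
--     max_k = 0
--     for p, _ in entries:
--         if len(p) > max_k:
--             max_k = len(p)
--     banned_tokens = []
--     for slice_ids in prev_input_ids:
--         n = len(slice_ids)
--         hits = []
--         for k in range(min(max_k, n) + 1):
--             hits.extend(by_prefix.get(tuple(slice_ids[n - k:]), []))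
--         hits.sort(key=lambda t: t[0])
--         banned_tokens.append([last for _, last in hits])
--     return banned_tokens
-- ===== Notes on version B (the rewrite author's own statement) =====
-- stated objective: faster
-- what changed: A compares every bad word's prefix against every context's suffix (inner scan over all B words per context); B groups the words by prefix into a dict once, then per context iterates only over the suffix LENGTHS 0..max prefix length, looks each suffix up, and restores word order by sorting on stored indices.
-- outside the precondition, e.g. on calc_banned_bad_words_ids([], [[]]): A returns [], B raises IndexError
import Mathlib
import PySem

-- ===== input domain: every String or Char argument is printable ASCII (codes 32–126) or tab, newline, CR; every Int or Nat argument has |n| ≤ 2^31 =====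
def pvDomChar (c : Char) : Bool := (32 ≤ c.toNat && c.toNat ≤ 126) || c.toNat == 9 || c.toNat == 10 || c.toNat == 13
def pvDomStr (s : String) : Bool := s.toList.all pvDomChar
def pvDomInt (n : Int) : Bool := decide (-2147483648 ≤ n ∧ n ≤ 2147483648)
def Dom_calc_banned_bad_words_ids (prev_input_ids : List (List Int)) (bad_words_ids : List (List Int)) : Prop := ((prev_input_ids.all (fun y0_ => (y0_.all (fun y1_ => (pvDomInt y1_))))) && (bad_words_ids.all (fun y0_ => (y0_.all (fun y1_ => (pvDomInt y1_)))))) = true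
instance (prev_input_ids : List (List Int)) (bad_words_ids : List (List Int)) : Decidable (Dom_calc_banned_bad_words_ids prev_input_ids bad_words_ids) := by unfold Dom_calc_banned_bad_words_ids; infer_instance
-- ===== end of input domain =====

-- B replaces A's per-(context, bad word) suffix comparison by a prefix-grouped dict index
-- built once; per context it iterates only over the suffix lengths, looks each suffix up,
-- and restores the original word order by sorting on stored indices (the inner scan over
-- the bad words disappears).


-- ===== PORT A =====
-- _tokens_match(prev_tokens, tokens)
def pvTokensMatch (prev_tokens tokens : List Int) : Bool :=
  if tokens.length == 0 then true
  else if tokens.length > prev_tokens.length then false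
  else if PySem.List.slice prev_tokens (some (-(tokens.length : Int))) none == tokens then true
  else false

-- the assert is guaranteed by Pre_ (every bad-word sequence nonempty); seq[-1] via pyGet?
def calc_banned_bad_words_ids (prev_input_ids : List (List Int)) (bad_words_ids : List (List Int)) : List (List Int) :=
  prev_input_ids.foldl (fun banned_tokens prev_slice =>
    banned_tokens ++ [bad_words_ids.foldl (fun bs seq =>
      if (pvTokensMatch prev_slice (PySem.List.slice seq none (some (-1))) == false) then bs
      else bs ++ [(PySem.List.pyGet? seq (-1)).getD 0]) []]) []

-- ===== PORT B =====
-- entries = [(tuple(seq[:-1]), (idx, seq[-1])) for idx, seq in enumerate(bad_words_ids)]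
def pvEntries (bad_words_ids : List (List Int)) : List (List Int × (Int × Int)) :=
  (PySem.List.enumerate bad_words_ids).map (fun e =>
    (PySem.List.slice e.2 none (some (-1)), (e.1, (PySem.List.pyGet? e.2 (-1)).getD 0)))

-- by_prefix.setdefault(p, []).append(il)  ==  d[p] = d.get(p, []) + [il]  (Dict.modify)
def pvByPrefix (entries : List (List Int × (Int × Int))) : PySem.Dict (List Int) (List (Int × Int)) :=
  entries.foldl (fun d p => d.modify p.1 [] (fun x => x ++ [p.2])) PySem.Dict.empty

-- max_k accumulated with the literal 'if len(p) > max_k' test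
def pvMaxK (entries : List (List Int × (Int × Int))) : Nat :=
  entries.foldl (fun m p => if p.1.length > m then p.1.length else m) 0

def calc_banned_bad_words_ids_alt (prev_input_ids : List (List Int)) (bad_words_ids : List (List Int)) : List (List Int) :=
  let entries := pvEntries bad_words_ids
  let byp := pvByPrefix entries
  let maxk := pvMaxK entries
  prev_input_ids.map (fun slice_ids =>
    let n := slice_ids.length
    let hits := (PySem.List.pyRange 0 ((min maxk n + 1 : Nat) : Int)).foldl
      (fun h k => h ++ byp.getD (PySem.List.slice slice_ids (some ((n : Int) - k)) none) []) []
    (PySem.List.sorted hits (fun t => t.1)).map (fun t => t.2))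

-- ===== PRECONDITION & SPEC =====
-- Pre_ excludes inputs containing an empty bad-word sequence: with a nonempty prev_input_ids
-- A's assert raises AssertionError there, and B's seq[-1] raises IndexError even for empty
-- prev_input_ids (where A still returns []).
def Pre_calc_banned_bad_words_ids (prev_input_ids : List (List Int)) (bad_words_ids : List (List Int)) : Prop :=
  ∀ seq ∈ bad_words_ids, seq ≠ []
instance (prev_input_ids : List (List Int)) (bad_words_ids : List (List Int)) : Decidable (Pre_calc_banned_bad_words_ids prev_input_ids bad_words_ids) := by unfold Pre_calc_banned_bad_words_ids; infer_instance

def pvWitness_calc_banned_bad_words_ids : List (List Int) × List (List Int) :=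
  ([[1, 2], [3]], [[2, 7], [1, 2, 9], [5]])

def Spec_calc_banned_bad_words_ids (prev_input_ids : List (List Int)) (bad_words_ids : List (List Int)) (out : List (List Int)) : Prop := out = calc_banned_bad_words_ids_alt prev_input_ids bad_words_ids
instance (prev_input_ids : List (List Int)) (bad_words_ids : List (List Int)) (out : List (List Int)) : Decidable (Spec_calc_banned_bad_words_ids prev_input_ids bad_words_ids out) := by unfold Spec_calc_banned_bad_words_ids; infer_instance

-- ===== CLAIM (what is proved, stated in full; the proofs are below) =====
def Claim_equal_calc_banned_bad_words_ids : Prop := ∀ (prev_input_ids : List (List Int)) (bad_words_ids : List (List Int)), Dom_calc_banned_bad_words_ids prev_input_ids bad_words_ids → Pre_calc_banned_bad_words_ids prev_input_ids bad_words_ids → Spec_calc_banned_bad_words_ids prev_input_ids bad_words_ids (calc_banned_bad_words_ids prev_input_ids bad_words_ids)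

-- ===== LEMMAS AND PROOFS =====

-- pvMaxK bounds every prefix length (accumulator generalized)
theorem pvMaxK_aux (ps : List (List Int × (Int × Int))) (acc : Nat) :
    acc ≤ ps.foldl (fun m p => if p.1.length > m then p.1.length else m) acc ∧
    ∀ p ∈ ps, p.1.length ≤ ps.foldl (fun m p => if p.1.length > m then p.1.length else m) acc := by
  induction ps generalizing acc with
  | nil => simp
  | cons q t ih =>
    simp only [List.foldl_cons]
    have hstep : acc ≤ if q.1.length > acc then q.1.length else acc := by split <;> omega
    have hq : q.1.length ≤ if q.1.length > acc then q.1.length else acc := by split <;> omega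
    refine ⟨le_trans hstep (ih _).1, ?_⟩
    intro p hp
    rcases List.mem_cons.mp hp with h | h
    · subst h; exact le_trans hq (ih _).1
    · exact (ih _).2 p h

theorem pvMaxK_bound (ps : List (List Int × (Int × Int))) (p : List Int × (Int × Int))
    (hp : p ∈ ps) : p.1.length ≤ pvMaxK ps :=
  (pvMaxK_aux ps 0).2 p hp

-- one element pulled through a flatMap of filters (at most one index hits it)
theorem flatMap_filter_cons {α : Type} (ks : List Nat) (e : α) (E : List α) (p : Nat → α → Bool)
    (hnd : ks.Nodup) (hone : ∀ k1 ∈ ks, ∀ k2 ∈ ks, p k1 e = true → p k2 e = true → k1 = k2) :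
    (ks.flatMap fun k => (e :: E).filter (p k)).Perm
      ((if ks.any (fun k => p k e) then [e] else []) ++ ks.flatMap fun k => E.filter (p k)) := by
  induction ks with
  | nil => simp
  | cons k ks' ih =>
    have hnd' := (List.nodup_cons.mp hnd).2
    have hk_not : k ∉ ks' := (List.nodup_cons.mp hnd).1
    have hone' : ∀ k1 ∈ ks', ∀ k2 ∈ ks', p k1 e = true → p k2 e = true → k1 = k2 :=
      fun k1 h1 k2 h2 => hone k1 (List.mem_cons_of_mem _ h1) k2 (List.mem_cons_of_mem _ h2)
    by_cases hpk : p k e = true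
    · -- e lands in the k-block and in no other block
      have hnone : ∀ k' ∈ ks', p k' e = false := by
        intro k' hk'
        cases h : p k' e
        · rfl
        · exact absurd ((hone k List.mem_cons_self k' (List.mem_cons_of_mem _ hk') hpk h) ▸ hk')
            hk_not
      have hblocks2 : (ks'.flatMap fun k' =>
            if p k' e = true then e :: E.filter (p k') else E.filter (p k')) =
          ks'.flatMap fun k' => E.filter (p k') := by
        apply List.flatMap_congr
        intro k' hk'
        simp [hnone k' hk']
      have hany : (k :: ks').any (fun k => p k e) = true := by simp [hpk]
      simp only [List.flatMap_cons, List.filter_cons, hpk, if_true, hany,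
        List.cons_append]
      rw [hblocks2, List.nil_append]
    · have hpkf : p k e = false := by
        cases h : p k e
        · rfl
        · exact absurd h hpk
      have hany : (k :: ks').any (fun k => p k e) = ks'.any (fun k => p k e) := by simp [hpkf]
      simp only [List.flatMap_cons, List.filter_cons, hpkf, Bool.false_eq_true, if_false, hany]
      have ihh := ih hnd' hone'
      simp only [List.filter_cons] at ihh
      refine (ihh.append_left _).trans ?_
      by_cases h : ks'.any (fun k => p k e) = true
      · simp only [h, if_pos]
        exact List.perm_middle
      · simp [h]

-- flatMap of disjoint filters is a permutation of one filter by 'any'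
theorem flatMap_filter_perm {α : Type} (ks : List Nat) (E : List α) (p : Nat → α → Bool)
    (hnd : ks.Nodup)
    (hdisj : ∀ e ∈ E, ∀ k1 ∈ ks, ∀ k2 ∈ ks, p k1 e = true → p k2 e = true → k1 = k2) :
    (ks.flatMap fun k => E.filter (p k)).Perm (E.filter (fun e => ks.any (fun k => p k e))) := by
  induction E with
  | nil => simp
  | cons e E' ih =>
    have hone := hdisj e List.mem_cons_self
    have hdisj' : ∀ x ∈ E', ∀ k1 ∈ ks, ∀ k2 ∈ ks, p k1 x = true → p k2 x = true → k1 = k2 :=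
      fun x hx => hdisj x (List.mem_cons_of_mem _ hx)
    refine (flatMap_filter_cons ks e E' p hnd hone).trans ?_
    refine ((ih hdisj').append_left _).trans ?_
    by_cases h : ks.any (fun k => p k e) = true
    · simp [List.filter_cons, h]
    · simp [List.filter_cons, h]

-- the per-slice 'any suffix matches' test is A's _tokens_match
theorem any_range_eq_tokensMatch (s pf : List Int) (maxk : Nat) (hlen : pf.length ≤ maxk) :
    (List.range (min maxk s.length + 1)).any (fun k => pf == s.drop (s.length - k)) =
      pvTokensMatch s pf := by
  by_cases h0 : pf = []
  · subst h0
    have : pvTokensMatch s [] = true := by simp [pvTokensMatch]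
    rw [this, List.any_eq_true]
    exact ⟨0, List.mem_range.mpr (Nat.succ_pos _), by simp [List.drop_length]⟩
  · have hp0 : 0 < pf.length := List.length_pos_iff.mpr h0
    have hne : ¬ ((pf.length == 0) = true) := by
      simp only [beq_iff_eq]; omega
    by_cases hle : pf.length ≤ s.length
    · have hslice : PySem.List.slice s (some (-(pf.length : Int))) none
          = s.drop (s.length - pf.length) := PySem.List.slice_from_neg_natCast s pf.length hp0
      have hrhs : pvTokensMatch s pf = (s.drop (s.length - pf.length) == pf) := by
        unfold pvTokensMatch
        rw [if_neg hne, if_neg (by omega), hslice]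
        cases h : (s.drop (s.length - pf.length) == pf) <;> simp [h]
      rw [hrhs, Bool.eq_iff_iff, List.any_eq_true]
      simp only [List.mem_range, beq_iff_eq]
      constructor
      · rintro ⟨k, hk, heq⟩
        have hkn : k ≤ s.length := le_trans (Nat.lt_succ_iff.mp hk) (Nat.min_le_right _ _)
        have hpk : pf.length = k := by
          rw [heq, List.length_drop]; omega
        rw [hpk, ← heq]
      · intro h
        exact ⟨pf.length, Nat.lt_succ_of_le (le_min hlen hle), h.symm⟩
    · have hrhs : pvTokensMatch s pf = false := by
        unfold pvTokensMatch
        rw [if_neg hne, if_pos (by omega)]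
      rw [hrhs, List.any_eq_false]
      intro k _
      simp only [beq_iff_eq]
      intro heq
      have : pf.length = s.length - (s.length - k) := by rw [heq, List.length_drop]
      omega

-- enumerate/filter/map on the second components collapses to plain filter/map
theorem enumerate_filter_map {α β : Type} (l : List α) (s0 : Int) (c : α → Bool) (h : α → β) :
    ((PySem.List.enumerate l s0).filter (fun e => c e.2)).map (fun e => h e.2) =
      (l.filter c).map h := by
  induction l generalizing s0 with
  | nil => simp
  | cons x xs ih =>
    rw [PySem.List.enumerate_cons]
    by_cases hc : c x = true
    · simp [List.filter_cons, hc, ih]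
    · simp [hc, ih]

-- ===== VERDICT (by name: the statement is the Claim_ definition above) =====
theorem calc_banned_bad_words_ids_spec : Claim_equal_calc_banned_bad_words_ids := by
  intro prev bad _ _
  unfold Spec_calc_banned_bad_words_ids calc_banned_bad_words_ids calc_banned_bad_words_ids_alt
  rw [PySem.List.foldl_append_singleton_eq_map]
  simp only [List.nil_append]
  apply List.map_congr_left
  intro s _
  -- A's inner loop as filter/map over bad
  have hfun : (fun (bs : List Int) (seq : List Int) =>
      if (pvTokensMatch s (PySem.List.slice seq none (some (-1))) == false) then bs
      else bs ++ [(PySem.List.pyGet? seq (-1)).getD 0])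
      = (fun bs seq => if pvTokensMatch s (PySem.List.slice seq none (some (-1)))
          then bs ++ [(PySem.List.pyGet? seq (-1)).getD 0] else bs) := by
    funext bs seq
    cases h : pvTokensMatch s (PySem.List.slice seq none (some (-1))) <;> simp [h]
  rw [hfun, PySem.List.foldl_append_if]
  simp only [List.nil_append]
  -- B's inner computation
  set entries := pvEntries bad with hentries
  set n := s.length with hn
  set K := min (pvMaxK entries) n + 1 with hK
  -- per-suffix-length group
  set G : Nat → List (Int × Int) :=
    (fun k => ((entries.filter (fun p => p.1 == s.drop (n - k))).map (fun x => x.2))) with hG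
  have hstep1 : (PySem.List.pyRange 0 ((K : Nat) : Int)).foldl
      (fun h k => h ++ (pvByPrefix entries).getD (PySem.List.slice s (some ((n : Int) - k)) none) []) []
      = (List.range K).foldl (fun h k => h ++ G k) [] := by
    rw [PySem.List.pyRange_zero_natCast, List.foldl_map]
    apply PySem.List.foldl_congr_mem
    intro acc k hk
    have hkn : k ≤ n := by
      have := List.mem_range.mp hk
      omega
    have hcast : ((n : Int) - (k : Nat)) = ((n - k : Nat) : Int) := by omega
    rw [hcast, PySem.List.slice_from_natCast]
    unfold pvByPrefix
    rw [PySem.Dict.getD_foldl_modify_append]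
    simp [PySem.Dict.getD_empty, hG]
  have hdisj : ∀ e ∈ entries, ∀ k1 ∈ List.range K, ∀ k2 ∈ List.range K,
      (e.1 == s.drop (n - k1)) = true → (e.1 == s.drop (n - k2)) = true → k1 = k2 := by
    intro e _ k1 hk1 k2 hk2 h1 h2
    have hk1n : k1 ≤ n := by have := List.mem_range.mp hk1; omega
    have hk2n : k2 ≤ n := by have := List.mem_range.mp hk2; omega
    have e1 := beq_iff_eq.mp h1
    have e2 := beq_iff_eq.mp h2
    have l1 : e.1.length = n - (n - k1) := by rw [e1, List.length_drop]
    have l2 : e.1.length = n - (n - k2) := by rw [e2, List.length_drop]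
    omega
  have hperm : ((List.range K).flatMap
        (fun k => entries.filter (fun p => p.1 == s.drop (n - k)))).Perm
      (entries.filter (fun e => pvTokensMatch s e.1)) := by
    refine (flatMap_filter_perm (List.range K) entries _ (List.nodup_range) hdisj).trans ?_
    rw [List.filter_congr]
    intro e he
    exact any_range_eq_tokensMatch s e.1 (pvMaxK entries) (pvMaxK_bound entries e he)
  -- the ordered target list and its strict index ordering
  set target0 := entries.filter (fun e => pvTokensMatch s e.1) with htarget0
  have hpw : target0.Pairwise (fun a b => a.2.1 < b.2.1) := by
    apply List.Pairwise.filter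
    rw [hentries]
    unfold pvEntries
    exact (PySem.List.pairwise_lt_enumerate bad 0).map _ (fun a b h => h)
  have hsorted : PySem.List.sorted ((List.range K).foldl (fun h k => h ++ G k) [])
      (fun t => t.1) = target0.map (fun x => x.2) := by
    apply PySem.List.sorted_eq_of_perm_of_pairwise_lt
    · rw [PySem.List.foldl_append_eq_flatMap, List.nil_append, hG, ← List.map_flatMap]
      exact (hperm.map (fun x => x.2)).symm
    · exact hpw.map _ (fun a b h => h)
  simp only [hstep1, hsorted]
  -- collapse entries back to bad
  rw [htarget0, hentries]
  unfold pvEntries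
  rw [List.filter_map, List.map_map, List.map_map]
  exact (enumerate_filter_map bad 0
    (fun seq => pvTokensMatch s (PySem.List.slice seq none (some (-1))))
    (fun seq => (PySem.List.pyGet? seq (-1)).getD 0)).symm
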